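-- pv_equiv track=rewrite | github.com/981377660LMT/algorithm-study | leetcode/bishi/p型回文串.py | solve
-- ===== SOURCE A (Python) =====
-- from collections import defaultdict
--
-- def solve(n: int, p: int, s: str) -> int:
--     res = 0
--     group = [[] for _ in range(p)]
--     for i in range(n):
--         group[i % p].append(s[i])
--
--     for i in range(p // 2):
--         count = 0
--         counter = defaultdict(int)
--         for char in group[i]:
--             counter[char] += 1
--             count += 1
--         if p - i - 1 > i:
--             for char in group[p - i - 1]:
--                 counter[char] += 1
--                 count += 1
--         max_ = max(counter.values())
--         res += count - max_
--     return res
-- ===== SOURCE B (Python) =====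
-- def solve(n: int, p: int, s: str) -> int:
--     res = 0
--     for k in range(p // 2):
--         chars = sorted(s[j] for j in range(n) if j % p in (k, p - 1 - k))
--         runs = []
--         prev = None
--         for c in chars:
--             if c == prev:
--                 runs[-1] += 1
--             else:
--                 runs.append(1)
--             prev = c
--         res += len(chars) - max(runs)
--     return res
-- ===== Notes on version B (the rewrite author's own statement) =====
-- stated objective: alternative
-- what changed: B replaces A's residue-bucketing plus per-pair defaultdict frequency counting by a sort-based method: for each mirrored pair it selects the pair's characters directly from s, sorts them, builds the run-length list and subtracts max(runs); no buckets and no hash counter anywhere. It trades speed for the different strategy: each pair re-scans the string, so B is slower on large inputs.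
import Mathlib
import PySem

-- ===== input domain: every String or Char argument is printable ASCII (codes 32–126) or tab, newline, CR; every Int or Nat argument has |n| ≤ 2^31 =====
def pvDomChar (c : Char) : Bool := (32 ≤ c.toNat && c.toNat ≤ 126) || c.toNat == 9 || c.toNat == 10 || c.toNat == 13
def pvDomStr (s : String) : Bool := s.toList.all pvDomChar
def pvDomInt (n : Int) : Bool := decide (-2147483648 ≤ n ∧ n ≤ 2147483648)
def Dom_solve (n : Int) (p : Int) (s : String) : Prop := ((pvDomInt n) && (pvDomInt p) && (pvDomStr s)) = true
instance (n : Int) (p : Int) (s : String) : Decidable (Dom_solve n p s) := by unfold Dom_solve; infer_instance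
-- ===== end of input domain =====

-- B drops A's residue buckets and per-pair hash counters entirely: for each mirrored pair it
-- selects the pair's characters directly from s, SORTS them and takes the longest run of equal
-- characters (via the run-length list) instead of a dictionary's max frequency; a genuinely
-- different, sort-based method of similar size that trades A's O(n+p) for O(n·p/2 + sorting)
-- (objective: alternative).

-- ===== PORT A =====
-- `group[idx].append(c)` (Python list indexing; under Pre_ the index is always in range —
-- out of range Python raises IndexError, here a no-op).
def pyAppendAt (g : List (List Char)) (idx : Int) (c : Char) : List (List Char) :=
  if 0 ≤ idx then g.modify idx.toNat (· ++ [c]) else g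

-- `counter[char] += 1; count += 1` over a char list, state = (counter, count).
def pairScan (l : List Char) (st : PySem.Dict Char Int × Int) : PySem.Dict Char Int × Int :=
  l.foldl (fun st ch => (st.1.modify ch 0 (· + 1), st.2 + 1)) st

def solve (n : Int) (p : Int) (s : String) : Int :=
  let group : List (List Char) :=
    (PySem.List.pyRange 0 n).foldl
      (fun g i =>
        match PySem.Str.pyGet? s i with
        | some c => pyAppendAt g (PySem.Int.mod i p) c
        | none => g)
      (List.replicate p.toNat [])
  (PySem.List.pyRange 0 (PySem.Int.floordiv p 2)).foldl
    (fun res i =>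
      let st0 := pairScan ((PySem.List.pyGet? group i).getD []) (PySem.Dict.empty, 0)
      let st :=
        if p - i - 1 > i then
          pairScan ((PySem.List.pyGet? group (p - i - 1)).getD []) st0
        else st0
      res + (st.2 - (PySem.List.max? st.1.values (fun v => v)).getD 0))
    0

-- ===== PORT B =====
-- the body of Source B's inner `for c in chars` loop, state = (runs, prev);
-- `runs[-1] += 1` is the Python -1-index update (pyGetD/pySetD; runs is nonempty there)
def runStep (st : List Int × Option Char) (c : Char) : List Int × Option Char :=
  if some c = st.2 then
    (PySem.List.pySetD st.1 (-1) (PySem.List.pyGetD st.1 (-1) 0 + 1), some c)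
  else (st.1 ++ [1], some c)

-- `sorted(s[j] for j in range(n) if j % p in (k, p - 1 - k))`
def pairChars (n : Int) (p : Int) (s : String) (k : Int) : List Char :=
  PySem.List.sorted
    ((PySem.List.pyRange 0 n).filterMap
      (fun j => if PySem.Int.mod j p = k ∨ PySem.Int.mod j p = p - 1 - k
                then PySem.Str.pyGet? s j else none))
    (fun c => c) false

def solve_alt (n : Int) (p : Int) (s : String) : Int :=
  (PySem.List.pyRange 0 (PySem.Int.floordiv p 2)).foldl
    (fun res k =>
      let chars := pairChars n p s k
      let runs := (chars.foldl runStep ([], none)).1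
      -- `max(runs)`: none = Python's ValueError on an empty pair (excluded by Pre_)
      res + ((chars.length : Int) - (PySem.List.max? runs (fun v => v)).getD 0))
    0

-- ===== PRECONDITION & SPEC =====
-- Exactly the inputs where Python A returns: for n > 0 it needs 1 ≤ p (else ZeroDivisionError /
-- IndexError), n ≤ len(s) (else IndexError) and p//2 ≤ n (else max() of an empty counter raises
-- ValueError); for n ≤ 0 it needs p ≤ 1 (else ValueError on the first empty pair).
-- (The two PORTS in fact agree on every input — where Python raises, both ports' total
-- primitives take the same defaults — so the proof below does not need Pre_; Pre_ records
-- exactly where the claim speaks about Python A's actual value.)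
def Pre_solve (n : Int) (p : Int) (s : String) : Prop :=
  (0 < n → 1 ≤ p ∧ n ≤ PySem.Str.len s ∧ PySem.Int.floordiv p 2 ≤ n) ∧ (n ≤ 0 → p ≤ 1)
instance (n : Int) (p : Int) (s : String) : Decidable (Pre_solve n p s) := by
  unfold Pre_solve; infer_instance

def pvWitness_solve : Int × Int × String := (4, 3, "abab")

def Spec_solve (n : Int) (p : Int) (s : String) (out : Int) : Prop := out = solve_alt n p s
instance (n : Int) (p : Int) (s : String) (out : Int) : Decidable (Spec_solve n p s out) := by
  unfold Spec_solve; infer_instance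

-- ===== CLAIM (what is proved, stated in full; the proofs are below) =====
def Claim_equal_solve : Prop := ∀ (n : Int) (p : Int) (s : String), Dom_solve n p s → Pre_solve n p s → Spec_solve n p s (solve n p s)

-- ===== LEMMAS AND PROOFS =====

-- the characters A stores in group[t]: chars of positions j < n with j % p = t, in order
def resChars (n p : Int) (s : String) (t : Int) : List Char :=
  (PySem.List.pyRange 0 n).filterMap
    (fun j => if PySem.Int.mod j p = t then PySem.Str.pyGet? s j else none)

-- the (unsorted) characters B selects for pair k, in position order
def mixChars (n p : Int) (s : String) (k : Int) : List Char :=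
  (PySem.List.pyRange 0 n).filterMap
    (fun j => if PySem.Int.mod j p = k ∨ PySem.Int.mod j p = p - 1 - k
              then PySem.Str.pyGet? s j else none)

-- recursive form of "maximum multiplicity of an element" (0 on [])
def maxCount : List Char → Int
  | [] => 0
  | a :: t => max (1 + (t.count a : Int)) (maxCount (t.filter (fun c => c ≠ a)))
termination_by l => l.length
decreasing_by
  refine Nat.lt_succ_of_le ?_
  rw [List.length_unattach]
  exact (List.length_filter_le _ _).trans (Nat.le_of_eq List.length_attach)

theorem pairScan_eq (l : List Char) (d : PySem.Dict Char Int) (c : Int) :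
    pairScan l (d, c) = (l.foldl (fun d ch => d.modify ch 0 (· + 1)) d, c + l.length) := by
  induction l generalizing d c with
  | nil => simp [pairScan]
  | cons ch t ih =>
      simp only [pairScan, List.foldl_cons] at ih ⊢
      rw [ih]
      simp only [Prod.mk.injEq, List.length_cons, true_and]
      omega

theorem groupA_get (p : Int) (s : String) (L : List Int) (g : List (List Char)) (t : Nat) :
    ((L.foldl (fun g i =>
        match PySem.Str.pyGet? s i with
        | some c => pyAppendAt g (PySem.Int.mod i p) c
        | none => g) g)[t]?) =
    (g[t]?).map (· ++ L.filterMap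
        (fun j => if PySem.Int.mod j p = (t : Int) then PySem.Str.pyGet? s j else none)) := by
  induction L generalizing g with
  | nil => simp
  | cons i L ih =>
      simp only [List.foldl_cons, List.filterMap_cons]
      cases hc : PySem.Str.pyGet? s i with
      | none =>
          rw [ih]
          by_cases h : PySem.Int.mod i p = (t : Int) <;> simp [h]
      | some c =>
          by_cases h : PySem.Int.mod i p = (t : Int)
          · rw [ih]
            simp only [pyAppendAt]
            rw [if_pos (by omega)]
            rw [List.getElem?_modify]
            have ht : (PySem.Int.mod i p).toNat = t := by omega
            rw [ht]
            cases g[t]? <;> simp [h]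
          · rw [ih]
            simp only [pyAppendAt]
            by_cases h0 : 0 ≤ PySem.Int.mod i p
            · rw [if_pos h0, List.getElem?_modify]
              have ht : ¬ ((PySem.Int.mod i p).toNat = t) := by omega
              cases g[t]? <;> simp [h, ht]
            · rw [if_neg h0]
              cases g[t]? <;> simp [h]

-- disjoint-or filterMap splits as a permutation of the two separate filterMaps
theorem filterMap_or_perm {α β : Type} (P Q : α → Prop) [DecidablePred P] [DecidablePred Q]
    (v : α → Option β) (L : List α) (h : ∀ x ∈ L, ¬(P x ∧ Q x)) :
    (L.filterMap (fun x => if P x ∨ Q x then v x else none)).Perm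
      (L.filterMap (fun x => if P x then v x else none) ++
       L.filterMap (fun x => if Q x then v x else none)) := by
  induction L with
  | nil => simp
  | cons x L ih =>
      have hx := h x (by simp)
      have ih' := ih (fun y hy => h y (by simp [hy]))
      simp only [List.filterMap_cons]
      by_cases hP : P x
      · have hQ : ¬ Q x := fun hq => hx ⟨hP, hq⟩
        simp only [hP, true_or, if_pos, if_neg hQ]
        cases v x <;> simp_all
      · by_cases hQ : Q x
        · simp only [hP, hQ, or_true, if_pos]
          cases hv : v x with
          | none => simpa using ih'
          | some b =>
              refine (ih'.cons b).trans ?_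
              exact List.Perm.symm (List.perm_middle)
        · simp only [hP, hQ, or_self, if_neg, not_false_iff]
          simpa using ih'

theorem max?_id_perm (l1 l2 : List Int) (h : l1.Perm l2) :
    PySem.List.max? l1 (fun v => v) = PySem.List.max? l2 (fun v => v) := by
  cases h1 : PySem.List.max? l1 (fun v => v) with
  | none =>
      rw [PySem.List.max?_eq_none_iff] at h1
      subst h1
      have h2 : l2 = [] := by simpa using h.symm
      subst h2
      exact ((PySem.List.max?_eq_none_iff ([] : List Int) (fun v => v)).mpr rfl).symm
  | some m1 =>
      cases h2 : PySem.List.max? l2 (fun v => v) with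
      | none =>
          rw [PySem.List.max?_eq_none_iff] at h2
          subst h2
          have h3 : l1 = [] := by simpa using h
          subst h3
          rw [(PySem.List.max?_eq_none_iff ([] : List Int) (fun v => v)).mpr rfl] at h1
          exact absurd h1 (by simp)
      | some m2 =>
          have hm1 : m1 ∈ l1 := PySem.List.max?_mem h1
          have hm2 : m2 ∈ l2 := PySem.List.max?_mem h2
          have le1 : m1 ≤ m2 := PySem.List.max?_isMax h2 m1 (h.mem_iff.mp hm1)
          have le2 : m2 ≤ m1 := PySem.List.max?_isMax h1 m2 (h.mem_iff.mpr hm2)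
          rw [le_antisymm le1 le2]

theorem counter_values_max_perm (l1 l2 : List Char) (h : l1.Perm l2) :
    PySem.List.max? (PySem.Dict.counter l1).values (fun v => v) =
    PySem.List.max? (PySem.Dict.counter l2).values (fun v => v) := by
  apply max?_id_perm
  have hv1 : (PySem.Dict.counter l1).values =
      (PySem.Set.ofList l1).map (fun k => (l1.count k : Int)) := by
    show (PySem.Dict.counter l1).items.map (·.2) = _
    rw [PySem.Dict.items_counter]; simp
  have hv2 : (PySem.Dict.counter l2).values =
      (PySem.Set.ofList l2).map (fun k => (l2.count k : Int)) := by
    show (PySem.Dict.counter l2).items.map (·.2) = _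
    rw [PySem.Dict.items_counter]; simp
  rw [hv1, hv2]
  have hperm : (PySem.Set.ofList l1).Perm (PySem.Set.ofList l2) := by
    rw [List.perm_ext_iff_of_nodup (PySem.Set.nodup_ofList l1) (PySem.Set.nodup_ofList l2)]
    intro a
    rw [PySem.Set.mem_ofList, PySem.Set.mem_ofList, h.mem_iff]
  have hfun : (fun k : Char => (l1.count k : Int)) = (fun k : Char => (l2.count k : Int)) := by
    funext k
    exact_mod_cast h.count_eq k
  rw [hfun]
  exact hperm.map _

def groupOf (n p : Int) (s : String) : List (List Char) :=
  (PySem.List.pyRange 0 n).foldl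
    (fun g i =>
      match PySem.Str.pyGet? s i with
      | some c => pyAppendAt g (PySem.Int.mod i p) c
      | none => g)
    (List.replicate p.toNat [])

def stA (n p : Int) (s : String) (i : Int) : PySem.Dict Char Int × Int :=
  if p - i - 1 > i then
    pairScan ((PySem.List.pyGet? (groupOf n p s) (p - i - 1)).getD [])
      (pairScan ((PySem.List.pyGet? (groupOf n p s) i).getD []) (PySem.Dict.empty, 0))
  else pairScan ((PySem.List.pyGet? (groupOf n p s) i).getD []) (PySem.Dict.empty, 0)

def termA (n p : Int) (s : String) (i : Int) : Int :=
  (stA n p s i).2 - (PySem.List.max? (stA n p s i).1.values (fun v => v)).getD 0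

theorem group_get_res (n p : Int) (s : String) (t : Nat) (ht : t < p.toNat) :
    PySem.List.pyGet? (groupOf n p s) (t : Int) = some (resChars n p s t) := by
  rw [PySem.List.pyGet?_natCast]
  unfold groupOf
  rw [groupA_get]
  rw [List.getElem?_replicate, if_pos ht]
  simp [resChars]

-- `pairChars` is sorted(mixChars) by definition
theorem pairChars_eq_sorted_mix (n p : Int) (s : String) (k : Int) :
    pairChars n p s k = PySem.List.sorted (mixChars n p s k) (fun c => c) false := rfl

-- the selected characters are a permutation of A's pair group[k] ++ group[p-1-k]
theorem mix_perm (n p : Int) (s : String) (k : Nat)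
    (hk : (k : Int) < PySem.Int.floordiv p 2) :
    (mixChars n p s k).Perm (resChars n p s k ++ resChars n p s (p - 1 - (k : Int))) := by
  have hp : 2 ≤ p := by
    rw [PySem.Int.floordiv_eq_ediv_of_pos (by norm_num)] at hk; omega
  have hk' : 2 * (k : Int) < p - 1 := by
    rw [PySem.Int.floordiv_eq_ediv_of_pos (by norm_num)] at hk; omega
  unfold mixChars
  exact filterMap_or_perm (fun j => PySem.Int.mod j p = (k : Int))
      (fun j => PySem.Int.mod j p = p - 1 - (k : Int))
      (fun j => PySem.Str.pyGet? s j) (PySem.List.pyRange 0 n)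
      (fun j _ => by rintro ⟨h1, h2⟩; omega)

-- recursive form of the run-length list of a list whose equal elements are contiguous
def runsList : List Char → List Int
  | [] => []
  | a :: t => (1 + (t.count a : Int)) :: runsList (t.filter (fun c => c ≠ a))
termination_by l => l.length
decreasing_by
  refine Nat.lt_succ_of_le ?_
  rw [List.length_unattach]
  exact (List.length_filter_le _ _).trans (Nat.le_of_eq List.length_attach)

theorem pySetD_append_neg_one (xs : List Int) (x v : Int) :
    PySem.List.pySetD (xs ++ [x]) (-1) v = xs ++ [v] := by
  simp [PySem.List.pySetD, PySem.List.pySet?, PySem.List.pyIdx?]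

-- the inner-loop invariant: folding the tail of a sorted list from state (R ++ [r], some a)
theorem runsGo (t : List Char) : ∀ (a : Char) (r : Int) (R : List Int),
    ((a :: t).Pairwise (· ≤ ·)) →
    (t.foldl runStep (R ++ [r], some a)).1
      = R ++ [r + (t.count a : Int)] ++ runsList (t.filter (fun c => c ≠ a)) := by
  induction t with
  | nil =>
      intro a r R _
      simp [runsList]
  | cons c t' ih =>
      intro a r R hp
      rw [List.foldl_cons]
      by_cases hca : c = a
      · subst hca
        have hstep : runStep (R ++ [r], some c) c = (R ++ [r + 1], some c) := by
          simp [runStep, PySem.List.pyGetD_neg_one_append_singleton, pySetD_append_neg_one]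
        rw [hstep, ih c (r + 1) R hp.of_cons, List.count_cons_self,
          show (c :: t').filter (fun x => x ≠ c) = t'.filter (fun x => x ≠ c) by simp]
        push_cast
        ring_nf
      · rcases List.pairwise_cons.mp hp with ⟨hA, hp'⟩
        rcases List.pairwise_cons.mp hp' with ⟨hC, _⟩
        have hac : a < c := lt_of_le_of_ne (hA c (by simp)) (fun h => hca h.symm)
        have hnotin : a ∉ c :: t' := by
          intro hmem
          rcases List.mem_cons.mp hmem with h | h
          · exact hca h.symm
          · exact absurd (lt_of_lt_of_le hac (hC a h)) (lt_irrefl a)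
        have hstep : runStep (R ++ [r], some a) c = ((R ++ [r]) ++ [1], some c) := by
          have hne : ¬ (some c = some a) := by simpa using hca
          simp only [runStep, if_neg hne]
        rw [hstep, ih c 1 (R ++ [r]) hp',
          List.count_eq_zero.mpr hnotin,
          show (c :: t').filter (fun x => x ≠ a) = c :: t' from
            List.filter_eq_self.mpr (fun x hx => by
              simp only [ne_eq, decide_eq_true_eq]
              intro hxa
              exact hnotin (hxa ▸ hx)),
          runsList]
        simp [List.append_assoc]

-- the run-length list of a sorted list is runsList
theorem runs_sorted (l : List Char) (h : l.Pairwise (· ≤ ·)) :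
    (l.foldl runStep ([], none)).1 = runsList l := by
  cases l with
  | nil => simp [runsList]
  | cons a t =>
      rw [List.foldl_cons]
      have hstep : runStep ([], none) a = ([] ++ [1], some a) := by
        simp [runStep]
      rw [hstep, runsGo t a 1 [] h, runsList]
      simp [add_comm]

theorem foldl_max_comm (r : List Int) : ∀ (x y : Int),
    r.foldl max (max x y) = max x (r.foldl max y) := by
  induction r with
  | nil => intro x y; rfl
  | cons z r' ih =>
      intro x y
      rw [List.foldl_cons, List.foldl_cons, max_assoc, ih]

theorem max?_cons_getD (x : Int) (rest : List Int) (hx : 0 ≤ x) :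
    (PySem.List.max? (x :: rest) (fun v => v)).getD 0
      = max x ((PySem.List.max? rest (fun v => v)).getD 0) := by
  rw [PySem.List.max?_id_cons]
  cases rest with
  | nil =>
      simp only [List.foldl_nil, Option.getD_some]
      rw [(PySem.List.max?_eq_none_iff ([] : List Int) (fun v => v)).mpr rfl]
      simp only [Option.getD_none]
      omega
  | cons y r =>
      rw [PySem.List.max?_id_cons]
      simp only [Option.getD_some, List.foldl_cons]
      exact foldl_max_comm r x y

-- values of Counter(l) as a list: counts of the distinct elements
theorem counter_values (l : List Char) :
    (PySem.Dict.counter l).values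
      = (PySem.Set.ofList l).map (fun k => (l.count k : Int)) := by
  show (PySem.Dict.counter l).items.map (·.2) = _
  rw [PySem.Dict.items_counter]; simp

-- the maximum multiplicity is the max of the counter's values
theorem maxCount_eq_counter_max_aux : ∀ (N : Nat) (l : List Char), l.length ≤ N →
    maxCount l = (PySem.List.max? (PySem.Dict.counter l).values (fun v => v)).getD 0 := by
  intro N
  induction N with
  | zero =>
      intro l hl
      have hnil : l = [] := List.eq_nil_of_length_eq_zero (by omega)
      subst hnil
      rw [maxCount, counter_values]
      rfl
  | succ N ih =>
      intro l hl
      cases l with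
      | nil =>
          rw [maxCount, counter_values]
          rfl
      | cons a t =>
          rw [maxCount, counter_values]
          have hperm : (PySem.Set.ofList (a :: t)).Perm
              (a :: PySem.Set.ofList (t.filter (fun c => c ≠ a))) := by
            rw [List.perm_ext_iff_of_nodup (PySem.Set.nodup_ofList _)
              (by
                refine List.nodup_cons.mpr ⟨?_, PySem.Set.nodup_ofList _⟩
                rw [PySem.Set.mem_ofList]
                simp)]
            intro x
            by_cases hxa : x = a
            · subst hxa; simp [PySem.Set.mem_ofList]
            · simp [PySem.Set.mem_ofList, List.mem_filter, hxa]
          have hmap : ((a :: PySem.Set.ofList (t.filter (fun c => c ≠ a))).map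
                (fun k => ((a :: t).count k : Int)))
              = ((1 + (t.count a : Int)) ::
                  (PySem.Set.ofList (t.filter (fun c => c ≠ a))).map
                    (fun k => ((t.filter (fun c => c ≠ a)).count k : Int))) := by
            rw [List.map_cons]
            congr 1
            · rw [List.count_cons_self]; push_cast; ring
            · apply List.map_congr_left
              intro x hx
              have hxmem := (PySem.Set.mem_ofList _ _).mp hx
              have hxa : x ≠ a := by
                rcases List.mem_filter.mp hxmem with ⟨_, hd⟩
                simpa using hd
              have h1 : (a :: t).count x = t.count x := List.count_cons_of_ne hxa.symm
              have h2 : (t.filter (fun c => c ≠ a)).count x = t.count x := by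
                rw [List.count_filter]
                simp [hxa]
              rw [h1, h2]
          have hrec := ih (t.filter (fun c => c ≠ a))
            (le_trans (List.length_filter_le _ _) (by simp only [List.length_cons] at hl; omega))
          rw [max?_id_perm _ _ (hperm.map (fun k => ((a :: t).count k : Int))), hmap,
            max?_cons_getD _ _ (by positivity), ← counter_values, ← hrec]

theorem maxRuns_eq_maxCount_aux : ∀ (N : Nat) (l : List Char), l.length ≤ N →
    (PySem.List.max? (runsList l) (fun v => v)).getD 0 = maxCount l := by
  intro N
  induction N with
  | zero =>
      intro l hl
      have hnil : l = [] := List.eq_nil_of_length_eq_zero (by omega)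
      subst hnil
      rw [maxCount, runsList]
      rfl
  | succ N ih =>
      intro l hl
      cases l with
      | nil =>
          rw [maxCount, runsList]
          rfl
      | cons a t =>
          rw [maxCount, runsList, max?_cons_getD _ _ (by positivity),
            ih (t.filter (fun c => c ≠ a))
              (le_trans (List.length_filter_le _ _) (by simp only [List.length_cons] at hl; omega))]

theorem maxRuns_eq_maxCount (l : List Char) :
    (PySem.List.max? (runsList l) (fun v => v)).getD 0 = maxCount l :=
  maxRuns_eq_maxCount_aux l.length l le_rfl

theorem maxCount_eq_counter_max (l : List Char) :
    maxCount l = (PySem.List.max? (PySem.Dict.counter l).values (fun v => v)).getD 0 :=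
  maxCount_eq_counter_max_aux l.length l le_rfl

theorem term_eq (n p : Int) (s : String) (k : Nat)
    (hk : (k : Int) < PySem.Int.floordiv p 2) :
    termA n p s (k : Int) =
      ((pairChars n p s (k : Int)).length : Int)
        - (PySem.List.max? ((pairChars n p s (k : Int)).foldl runStep ([], none)).1
            (fun v => v)).getD 0 := by
  have hp : 2 ≤ p := by
    rw [PySem.Int.floordiv_eq_ediv_of_pos (by norm_num)] at hk; omega
  have hk2 : 2 * (k : Int) < p - 1 := by
    rw [PySem.Int.floordiv_eq_ediv_of_pos (by norm_num)] at hk; omega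
  have hkp : k < p.toNat := by omega
  set t2 : Nat := (p - (k : Int) - 1).toNat with ht2
  have ht2i : (t2 : Int) = p - 1 - (k : Int) := by omega
  have ht2p : t2 < p.toNat := by omega
  have hg1 := group_get_res n p s k hkp
  have hg2 := group_get_res n p s t2 ht2p
  rw [ht2i] at hg2
  unfold termA stA
  rw [if_pos (by omega)]
  rw [show p - (k : Int) - 1 = p - 1 - (k : Int) by ring, hg1, hg2]
  simp only [Option.getD_some]
  rw [pairScan_eq, pairScan_eq]
  have hcnt : (resChars n p s (p - 1 - (k : Int))).foldl (fun d ch => d.modify ch 0 (· + 1))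
      ((resChars n p s k).foldl (fun d ch => d.modify ch 0 (· + 1)) PySem.Dict.empty) =
      PySem.Dict.counter (resChars n p s k ++ resChars n p s (p - 1 - (k : Int))) := by
    rw [PySem.Dict.counter_eq_foldl, List.foldl_append]
  rw [hcnt]
  rw [pairChars_eq_sorted_mix n p s (k : Int)]
  have hsp : (PySem.List.sorted (mixChars n p s (k : Int)) (fun c => c) false).Perm
      (resChars n p s k ++ resChars n p s (p - 1 - (k : Int))) :=
    (PySem.List.sorted_perm _ _ _).trans (mix_perm n p s k hk)
  rw [runs_sorted _ (by simpa using PySem.List.sorted_pairwise (mixChars n p s (k : Int)) (fun c => c))]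
  rw [maxRuns_eq_maxCount, maxCount_eq_counter_max, counter_values_max_perm _ _ hsp]
  have hlen := hsp.length_eq
  simp only
  push_cast [List.length_append] at hlen ⊢
  omega

theorem solve_eq_alt (n p : Int) (s : String) : solve n p s = solve_alt n p s := by
  have hA : solve n p s =
      (PySem.List.pyRange 0 (PySem.Int.floordiv p 2)).foldl
        (fun res i => res + termA n p s i) 0 := rfl
  have hB : solve_alt n p s =
      (PySem.List.pyRange 0 (PySem.Int.floordiv p 2)).foldl
        (fun res k =>
          res + (((pairChars n p s k).length : Int)
            - (PySem.List.max? ((pairChars n p s k).foldl runStep ([], none)).1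
                (fun v => v)).getD 0)) 0 := rfl
  rw [hA, hB, PySem.List.foldl_add, PySem.List.foldl_add, zero_add, zero_add]
  congr 1
  apply List.map_congr_left
  intro i hi
  have hi' := PySem.List.mem_pyRange_one.mp hi
  have hcast : i = ((i.toNat : Nat) : Int) := by omega
  rw [hcast]
  exact term_eq n p s i.toNat (by omega)

-- ===== VERDICT (by name: the statement is the Claim_ definition above) =====
theorem solve_spec : Claim_equal_solve := by
  intro n p s _ _
  unfold Spec_solve
  exact solve_eq_alt n p s
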